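-- pv_equiv track=rewrite | github.com/iamKateryna/minimaxproject | reward_machines/reward_machine_utils.py | evaluate_dnf
-- ===== SOURCE A (Python) =====
-- def evaluate_dnf(formula,true_props):
--     """
--     Evaluates 'formula' assuming 'true_props' are the only true propositions and the rest are false.
--     e.g. evaluate_dnf("a&b|!c&d","d") returns True
--     """
--     # ANDs
--     if "&" in formula:
--         for f in formula.split("&"):
--             if not evaluate_dnf(f,true_props):
--                 return False
--         return True
--     # ORs
--     if "|" in formula:
--         for f in formula.split("|"):
--             if evaluate_dnf(f,true_props):
--                 return True
--         return False
--     # NOT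
--     if formula.startswith("!"):
--         return not evaluate_dnf(formula[1:], true_props)
--
--     # Base cases
--     if formula == "True":  return True
--     if formula == "False": return False
--     return formula in true_props
-- ===== SOURCE B (Python) =====
-- def _lit(lit, true_props):
--     neg = False
--     while lit.startswith("!"):
--         neg = not neg
--         lit = lit[1:]
--     if lit == "True":
--         val = True
--     elif lit == "False":
--         val = False
--     else:
--         val = lit in true_props
--     return val != neg
--
-- def evaluate_dnf(formula, true_props):
--     for conj in formula.split("&"):
--         ok = False
--         for lit in conj.split("|"):
--             if _lit(lit, true_props):
--                 ok = True
--                 break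
--         if not ok:
--             return False
--     return True
-- ===== Notes on version B (the rewrite author's own statement) =====
-- stated objective: simpler
-- what changed: Replaces A's recursion (which re-dispatches on '&'/'|'/'!' at every level) with two explicit nested loops over formula.split('&') and conj.split('|') plus an iterative literal evaluator that strips leading '!' with a negation toggle; no recursion remains.
import Mathlib
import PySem

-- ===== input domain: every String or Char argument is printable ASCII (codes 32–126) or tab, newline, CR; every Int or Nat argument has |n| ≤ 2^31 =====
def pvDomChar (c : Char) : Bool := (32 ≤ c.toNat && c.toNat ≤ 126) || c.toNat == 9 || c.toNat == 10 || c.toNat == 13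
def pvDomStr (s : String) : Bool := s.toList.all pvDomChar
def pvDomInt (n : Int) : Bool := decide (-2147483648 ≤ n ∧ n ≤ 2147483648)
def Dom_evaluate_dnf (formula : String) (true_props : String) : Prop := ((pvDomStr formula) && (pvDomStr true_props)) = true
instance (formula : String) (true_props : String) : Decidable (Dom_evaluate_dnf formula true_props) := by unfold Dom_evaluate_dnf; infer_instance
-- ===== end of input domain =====

-- B replaces A's recursion (re-dispatching on '&'/'|'/'!' at every level) by two explicit nested
-- loops over split('&') and split('|') plus an iterative '!'-stripping literal evaluator
-- (objective: simpler); same return value on every input.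

-- ===== PORT A =====
-- A is recursive; every recursive call is on a strictly shorter string, so a fuel of
-- length+1 (a totality guard only, never exhausted — proved in the lemmas) makes it structural.
def pvEvalA (fuel : Nat) (f : List Char) (tp : List Char) : Bool :=
  match fuel with
  | 0 => false   -- never reached: fuel stays above f.length throughout
  | fuel + 1 =>
    if PySem.Chars.isIn ['&'] f then
      -- for f' in formula.split("&"): if not evaluate_dnf(f', …): return False;  return True
      (PySem.Chars.splitOn f ['&']).all (fun p => pvEvalA fuel p tp)
    else if PySem.Chars.isIn ['|'] f then
      -- for f' in formula.split("|"): if evaluate_dnf(f', …): return True;  return False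
      (PySem.Chars.splitOn f ['|']).any (fun p => pvEvalA fuel p tp)
    else if PySem.Chars.startswith f ['!'] then
      !(pvEvalA fuel (f.drop 1) tp)          -- not evaluate_dnf(formula[1:], …)
    else if f = "True".toList then true
    else if f = "False".toList then false
    else PySem.Chars.isIn f tp               -- formula in true_props

def evaluate_dnf (formula : String) (true_props : String) : Bool :=
  pvEvalA (formula.toList.length + 1) formula.toList true_props.toList

-- ===== PORT B =====
-- _lit: while lit.startswith('!'): neg = not neg; lit = lit[1:]; then the base cases
def pvLitGo (lit : List Char) (neg : Bool) (tp : List Char) : Bool :=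
  if PySem.Chars.startswith lit ['!'] then pvLitGo (lit.drop 1) (!neg) tp
  else
    (if lit = "True".toList then true
     else if lit = "False".toList then false
     else PySem.Chars.isIn lit tp) != neg    -- return val != neg
termination_by lit.length
decreasing_by
  rename_i h
  simp [PySem.Chars.startswith] at h
  cases lit with
  | nil => simp at h
  | cons a as => simp

def pvLitB (lit : List Char) (tp : List Char) : Bool := pvLitGo lit false tp

-- inner loop: for lit in conj.split('|'): if _lit(lit, …): ok = True; break
def pvConjB (conj : List Char) (tp : List Char) : Bool :=
  (PySem.Chars.splitOn conj ['|']).any (fun l => pvLitB l tp)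

-- outer loop: for conj in formula.split('&'): … if not ok: return False;  return True
def evaluate_dnf_alt (formula : String) (true_props : String) : Bool :=
  (PySem.Chars.splitOn formula.toList ['&']).all (fun c => pvConjB c true_props.toList)

-- ===== PRECONDITION & SPEC =====
def Spec_evaluate_dnf (formula : String) (true_props : String) (out : Bool) : Prop := out = evaluate_dnf_alt formula true_props
instance (formula : String) (true_props : String) (out : Bool) : Decidable (Spec_evaluate_dnf formula true_props out) := by unfold Spec_evaluate_dnf; infer_instance

-- ===== CLAIM (what is proved, stated in full; the proofs are below) =====
def Claim_equal_evaluate_dnf : Prop := ∀ (formula : String) (true_props : String), Dom_evaluate_dnf formula true_props → Spec_evaluate_dnf formula true_props (evaluate_dnf formula true_props)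

-- ===== LEMMAS AND PROOFS =====

-- proof-only single-char splitter characterizing PySem.Chars.splitOn s [c]
def pvSplitC (c : Char) : List Char → List (List Char)
  | [] => [[]]
  | x :: xs =>
    if x = c then [] :: pvSplitC c xs
    else
      match pvSplitC c xs with
      | [] => [[x]]
      | p :: ps => (x :: p) :: ps

theorem pvSplitC_ne_nil (c : Char) (s : List Char) : pvSplitC c s ≠ [] := by
  cases s with
  | nil => simp [pvSplitC]
  | cons x xs => simp only [pvSplitC]; split <;> simp; split <;> simp

theorem pvSplitOn_go_eq (c : Char) :
    ∀ (fuel : Nat) (l cur : List Char) (acc : List (List Char)), l.length ≤ fuel →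
    PySem.Chars.splitOn.go [c] fuel l cur acc
      = acc.reverse ++ (pvSplitC c l).modifyHead (fun p => cur.reverse ++ p) := by
  intro fuel
  induction fuel with
  | zero =>
    intro l cur acc h
    have : l = [] := List.eq_nil_of_length_eq_zero (Nat.le_zero.mp h)
    subst this
    simp [PySem.Chars.splitOn.go, pvSplitC]
  | succ n ih =>
    intro l cur acc h
    cases l with
    | nil => simp [PySem.Chars.splitOn.go, pvSplitC]
    | cons x xs =>
      simp only [PySem.Chars.splitOn.go]
      by_cases hx : x = c
      · subst hx
        have hpre : List.isPrefixOf [x] (x :: xs) = true := by simp [List.isPrefixOf]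
        rw [if_pos hpre]
        simp only [List.length_singleton, List.drop_succ_cons, List.drop_zero]
        rw [ih xs [] (cur.reverse :: acc) (by simpa using Nat.lt_succ_iff.mp (Nat.lt_of_lt_of_le (Nat.lt_succ_self _) h))]
        cases hps : pvSplitC x xs with
        | nil => exact absurd hps (pvSplitC_ne_nil x xs)
        | cons p ps => simp [pvSplitC, hps]
      · have hpre : List.isPrefixOf [c] (x :: xs) = false := by
          simp [List.isPrefixOf]; intro hc; exact absurd hc.symm hx
        rw [if_neg (by simp [hpre])]
        rw [ih xs (x :: cur) acc (by simpa using Nat.succ_le_succ_iff.mp h)]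
        simp only [pvSplitC, if_neg hx]
        cases hps : pvSplitC c xs with
        | nil => exact absurd hps (pvSplitC_ne_nil c xs)
        | cons p ps => simp

theorem pvSplitOn_eq (c : Char) (s : List Char) :
    PySem.Chars.splitOn s [c] = pvSplitC c s := by
  unfold PySem.Chars.splitOn
  rw [pvSplitOn_go_eq c (s.length + 1) s [] [] (Nat.le_succ _)]
  cases hps : pvSplitC c s with
  | nil => exact absurd hps (pvSplitC_ne_nil c s)
  | cons p ps => simp

theorem pvMem_splitC_sublist {c : Char} {s p : List Char} (h : p ∈ pvSplitC c s) :
    p.Sublist s := by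
  induction s generalizing p with
  | nil => simp [pvSplitC] at h; simp [h]
  | cons x xs ih =>
    simp only [pvSplitC] at h
    by_cases hx : x = c
    · rw [if_pos hx] at h
      rcases List.mem_cons.mp h with h | h
      · simp [h]
      · exact (ih h).cons x
    · rw [if_neg hx] at h
      cases hps : pvSplitC c xs with
      | nil => exact absurd hps (pvSplitC_ne_nil c xs)
      | cons q qs =>
        rw [hps] at h
        rcases List.mem_cons.mp h with h | h
        · subst h
          exact (ih (hps ▸ List.mem_cons_self)).cons₂ x
        · exact (ih (hps ▸ List.mem_cons_of_mem q h)).cons x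

theorem pvMem_splitC_not_mem {c : Char} {s p : List Char} (h : p ∈ pvSplitC c s) :
    c ∉ p := by
  induction s generalizing p with
  | nil => simp [pvSplitC] at h; simp [h]
  | cons x xs ih =>
    simp only [pvSplitC] at h
    by_cases hx : x = c
    · rw [if_pos hx] at h
      rcases List.mem_cons.mp h with h | h
      · simp [h]
      · exact ih h
    · rw [if_neg hx] at h
      cases hps : pvSplitC c xs with
      | nil => exact absurd hps (pvSplitC_ne_nil c xs)
      | cons q qs =>
        rw [hps] at h
        rcases List.mem_cons.mp h with h | h
        · subst h
          intro hmem
          rcases List.mem_cons.mp hmem with h' | h'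
          · exact hx h'.symm
          · exact ih (hps ▸ List.mem_cons_self) h'
        · exact ih (hps ▸ List.mem_cons_of_mem q h)

theorem pvSplitC_of_not_mem {c : Char} {s : List Char} (h : c ∉ s) :
    pvSplitC c s = [s] := by
  induction s with
  | nil => simp [pvSplitC]
  | cons x xs ih =>
    simp only [pvSplitC]
    rw [if_neg (fun hx : x = c => h (by rw [hx] at *; exact List.mem_cons_self))]
    rw [ih (fun hm => h (List.mem_cons_of_mem x hm))]

theorem pvMem_splitC_length {c : Char} {s p : List Char} (hc : c ∈ s)
    (h : p ∈ pvSplitC c s) : p.length < s.length := by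
  induction s generalizing p with
  | nil => simp at hc
  | cons x xs ih =>
    simp only [pvSplitC] at h
    by_cases hx : x = c
    · rw [if_pos hx] at h
      rcases List.mem_cons.mp h with h | h
      · simp [h]
      · by_cases hcx : c ∈ xs
        · exact Nat.lt_trans (ih hcx h) (Nat.lt_succ_self _)
        · rw [pvSplitC_of_not_mem hcx] at h
          simp at h
          simp [h]
    · have hcx : c ∈ xs := by
        rcases List.mem_cons.mp hc with h' | h'
        · exact absurd h'.symm hx
        · exact h'
      rw [if_neg hx] at h
      cases hps : pvSplitC c xs with
      | nil => exact absurd hps (pvSplitC_ne_nil c xs)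
      | cons q qs =>
        rw [hps] at h
        rcases List.mem_cons.mp h with h | h
        · subst h
          simpa using Nat.succ_lt_succ (ih hcx (hps ▸ List.mem_cons_self))
        · exact Nat.lt_trans (ih hcx (hps ▸ List.mem_cons_of_mem q h)) (Nat.lt_succ_self _)

theorem pvIsIn_singleton (c : Char) (s : List Char) :
    PySem.Chars.isIn [c] s = true ↔ c ∈ s := by
  rw [PySem.Chars.isIn_iff_infix]
  constructor
  · intro h
    exact h.mem List.mem_cons_self
  · intro h
    rcases List.mem_iff_append.mp h with ⟨l1, l2, rfl⟩
    exact ⟨l1, l2, by simp⟩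

theorem pvLitGo_not (lit : List Char) (neg : Bool) (tp : List Char) :
    pvLitGo lit (!neg) tp = !(pvLitGo lit neg tp) := by
  induction hl : lit.length using Nat.strong_induction_on generalizing lit neg with
  | _ n ih =>
    by_cases hs : PySem.Chars.startswith lit ['!']
    · conv_lhs => rw [pvLitGo]
      conv_rhs => rw [pvLitGo]
      rw [if_pos hs, if_pos hs]
      subst hl
      exact ih _ (by simp [PySem.Chars.startswith] at hs; cases lit <;> simp_all) _ _ rfl
    · conv_lhs => rw [pvLitGo]
      conv_rhs => rw [pvLitGo]
      rw [if_neg hs, if_neg hs]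
      cases neg <;> simp

-- the outer/inner loop collapses to the single element when the separator is absent
theorem pvAll_no_amp {f tp : List Char} (h : '&' ∉ f) :
    (PySem.Chars.splitOn f ['&']).all (fun c => pvConjB c tp) = pvConjB f tp := by
  rw [pvSplitOn_eq, pvSplitC_of_not_mem h]
  simp

theorem pvConjB_no_bar {f tp : List Char} (h : '|' ∉ f) :
    pvConjB f tp = pvLitB f tp := by
  unfold pvConjB
  rw [pvSplitOn_eq, pvSplitC_of_not_mem h]
  simp

theorem pvMain (fuel : Nat) (f tp : List Char) (h : f.length < fuel) :
    pvEvalA fuel f tp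
      = (PySem.Chars.splitOn f ['&']).all (fun cj => pvConjB cj tp) := by
  induction fuel generalizing f with
  | zero => omega
  | succ n ih =>
    conv_lhs => rw [pvEvalA]
    by_cases h1 : PySem.Chars.isIn ['&'] f = true
    · rw [if_pos h1]
      have hamp : '&' ∈ f := (pvIsIn_singleton _ _).mp h1
      refine Bool.eq_iff_iff.mpr ?_
      rw [List.all_eq_true, List.all_eq_true]
      have key : ∀ p ∈ PySem.Chars.splitOn f ['&'], pvEvalA n p tp = pvConjB p tp := by
        intro p hp
        rw [pvSplitOn_eq] at hp
        have hlt : p.length < n := Nat.lt_of_lt_of_le (pvMem_splitC_length hamp hp) (Nat.lt_succ_iff.mp h)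
        rw [ih p hlt, pvAll_no_amp (pvMem_splitC_not_mem hp)]
      constructor <;> intro hh p hp
      · rw [← key p hp]; exact hh p hp
      · rw [key p hp]; exact hh p hp
    · rw [if_neg h1]
      have hamp : '&' ∉ f := fun hm => h1 ((pvIsIn_singleton _ _).mpr hm)
      rw [pvAll_no_amp hamp]
      by_cases h2 : PySem.Chars.isIn ['|'] f = true
      · rw [if_pos h2]
        have hbar : '|' ∈ f := (pvIsIn_singleton _ _).mp h2
        unfold pvConjB
        refine Bool.eq_iff_iff.mpr ?_
        rw [List.any_eq_true, List.any_eq_true]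
        have key : ∀ q ∈ PySem.Chars.splitOn f ['|'], pvEvalA n q tp = pvLitB q tp := by
          intro q hq
          rw [pvSplitOn_eq] at hq
          have hlt : q.length < n := Nat.lt_of_lt_of_le (pvMem_splitC_length hbar hq) (Nat.lt_succ_iff.mp h)
          have hsub := pvMem_splitC_sublist hq
          have hq_amp : '&' ∉ q := fun hm => hamp (hsub.mem hm)
          have hq_bar : '|' ∉ q := pvMem_splitC_not_mem hq
          rw [ih q hlt, pvAll_no_amp hq_amp, pvConjB_no_bar hq_bar]
        constructor <;> rintro ⟨q, hq, hv⟩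
        · exact ⟨q, hq, by rw [← key q hq]; exact hv⟩
        · exact ⟨q, hq, by rw [key q hq]; exact hv⟩
      · rw [if_neg h2]
        have hbar : '|' ∉ f := fun hm => h2 ((pvIsIn_singleton _ _).mpr hm)
        rw [pvConjB_no_bar hbar]
        by_cases h3 : PySem.Chars.startswith f ['!'] = true
        · rw [if_pos h3]
          have hne : f ≠ [] := by
            simp [PySem.Chars.startswith] at h3
            cases f <;> simp_all
          have hlt : (f.drop 1).length < n := by
            cases f with
            | nil => exact absurd rfl hne
            | cons a as => simpa using Nat.lt_succ_iff.mp h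
          have hd_amp : '&' ∉ f.drop 1 := fun hm => hamp (List.mem_of_mem_drop hm)
          have hd_bar : '|' ∉ f.drop 1 := fun hm => hbar (List.mem_of_mem_drop hm)
          rw [ih _ hlt, pvAll_no_amp hd_amp, pvConjB_no_bar hd_bar]
          unfold pvLitB
          conv_rhs => rw [pvLitGo]
          rw [if_pos h3]
          rw [show (!false) = true from rfl, show (true : Bool) = !false from rfl, pvLitGo_not]
        · rw [if_neg h3]
          unfold pvLitB
          conv_rhs => rw [pvLitGo]
          rw [if_neg h3]
          cases hbase : (if f = "True".toList then true
            else if f = "False".toList then false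
            else PySem.Chars.isIn f tp) <;> simp_all

-- ===== VERDICT (by name: the statement is the Claim_ definition above) =====
theorem evaluate_dnf_spec : Claim_equal_evaluate_dnf := by
  intro formula true_props _
  unfold Spec_evaluate_dnf evaluate_dnf evaluate_dnf_alt
  exact pvMain _ _ _ (Nat.lt_succ_self _)
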